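-- pv_equiv track=rewrite | github.com/opsiff/shisanshui | all.py | Dui
-- ===== SOURCE A (Python) =====
-- def Dui(five_list):
--     mapcheck = {}
--     for i in five_list:
--         if (mapcheck.__contains__(i[1]) == True):
--             # Python 3.X Not use has_key instead of __contains__
--             mapcheck[i[1]] += 1
--         else:
--             mapcheck[i[1]] = 1
--     _check = False
--     for i in five_list:
--         if mapcheck[i[1]] == 2:
--             _check = True
--     if _check:
--         return True
--     else:
--         return False
-- ===== SOURCE B (Python) =====
-- def Dui(five_list):
--     # sort the ranks, then scan consecutive runs of equal ranks;
--     # a hand has a pair iff some run has length exactly 2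
--     ranks = sorted(c[1] for c in five_list)
--     i, n = 0, len(ranks)
--     while i < n:
--         j = i + 1
--         while j < n and ranks[j] == ranks[i]:
--             j += 1
--         if j - i == 2:
--             return True
--         i = j
--     return False
-- ===== Notes on version B (the rewrite author's own statement) =====
-- stated objective: alternative
-- what changed: Replaced the count-dictionary build plus full re-scan with a sort-then-scan over consecutive equal-rank runs, returning True as soon as a run of length exactly 2 is found.
import Mathlib
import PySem

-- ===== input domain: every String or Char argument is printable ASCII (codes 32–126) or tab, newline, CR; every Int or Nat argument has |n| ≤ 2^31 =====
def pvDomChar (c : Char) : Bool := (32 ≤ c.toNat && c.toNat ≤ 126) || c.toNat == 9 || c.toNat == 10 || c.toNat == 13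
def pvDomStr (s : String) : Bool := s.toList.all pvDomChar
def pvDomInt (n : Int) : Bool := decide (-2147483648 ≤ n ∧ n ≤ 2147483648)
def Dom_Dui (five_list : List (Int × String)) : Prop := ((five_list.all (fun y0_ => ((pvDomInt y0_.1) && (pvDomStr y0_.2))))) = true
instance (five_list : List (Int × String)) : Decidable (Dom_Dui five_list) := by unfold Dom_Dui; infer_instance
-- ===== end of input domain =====

-- B replaces A's count-dictionary build plus full re-scan with a sort-then-scan over
-- consecutive equal-rank runs (pair iff some run has length exactly 2); alternative, not faster.

-- ===== PORT A =====
-- counting loop body: 'if mapcheck.__contains__(i[1]): mapcheck[i[1]] += 1 else: mapcheck[i[1]] = 1'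
def duiStep (d : PySem.Dict String Int) (i : Int × String) : PySem.Dict String Int :=
  if d.contains i.2 then d.modify i.2 0 (· + 1) else d.insert i.2 1

def Dui (five_list : List (Int × String)) : Bool :=
  let mapcheck := five_list.foldl duiStep PySem.Dict.empty
  -- 'mapcheck[i[1]]' cannot raise here (every key was inserted by the first loop), so getD is exact
  let check := five_list.foldl (fun c i => if mapcheck.getD i.2 0 == 2 then true else c) false
  if check then true else false

-- ===== PORT B =====
-- Source B's index scan over runs of the sorted rank list, ported as structural recursion:
-- the inner 'while ranks[j] == ranks[i]' is the takeWhile run, 'i = j' steps to the dropWhile tail (exact)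
def duiRuns (l : List String) : Bool :=
  match l with
  | [] => false
  | r :: rest =>
      if (rest.takeWhile (fun x => x == r)).length + 1 == 2 then true
      else duiRuns (rest.dropWhile (fun x => x == r))
termination_by l.length
decreasing_by
  simp only [List.length_cons]
  exact Nat.lt_succ_of_le (List.length_dropWhile_le _ _)

def Dui_alt (five_list : List (Int × String)) : Bool :=
  duiRuns (PySem.List.sorted (five_list.map Prod.snd) (fun x => x) false)

-- ===== PRECONDITION & SPEC =====
def Spec_Dui (five_list : List (Int × String)) (out : Bool) : Prop := out = Dui_alt five_list
instance (five_list : List (Int × String)) (out : Bool) : Decidable (Spec_Dui five_list out) := by unfold Spec_Dui; infer_instance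

-- ===== CLAIM (what is proved, stated in full; the proofs are below) =====
def Claim_equal_Dui : Prop := ∀ (five_list : List (Int × String)), Dom_Dui five_list → Spec_Dui five_list (Dui five_list)

-- ===== LEMMAS AND PROOFS =====

-- 'if c: return True else: return False' is the identity on Bool
theorem if_bool_id (c : Bool) : (if c = true then true else false) = c := by
  cases c <;> simp

-- 'any' respects a pointwise-on-members equality of predicates
theorem any_congr_mem {α : Type} {l : List α} {p q : α → Bool}
    (h : ∀ x ∈ l, p x = q x) : l.any p = l.any q := by
  induction l with
  | nil => rfl
  | cons x xs ih =>
      simp only [List.any_cons]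
      rw [h x (by simp), ih (fun y hy => h y (by simp [hy]))]

-- the counting loop computes occurrence counts of the ranks
theorem getD_foldl_duiStep (xs : List (Int × String)) (d : PySem.Dict String Int) (v : String) :
    (xs.foldl duiStep d).getD v 0 = d.getD v 0 + ((xs.map Prod.snd).count v : Int) := by
  induction xs generalizing d with
  | nil => simp
  | cons i xs ih =>
      rw [List.foldl_cons, ih]
      have hstep : (duiStep d i).getD v 0 =
          if v = i.2 then d.getD v 0 + 1 else d.getD v 0 := by
        unfold duiStep
        split
        · rw [PySem.Dict.getD_modify]
          by_cases h : v = i.2 <;> simp [h]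
        · rename_i hc
          by_cases h : v = i.2
          · subst h
            rw [if_pos rfl, PySem.Dict.getD_insert_self,
                PySem.Dict.getD_of_not_contains d 0 (by simpa using hc)]
            omega
          · rw [if_neg h, PySem.Dict.getD_insert_of_ne d _ _ h]
      rw [hstep, List.map_cons, List.count_cons]
      by_cases h : v = i.2
      · simp [h]; ring
      · have : (i.2 == v) = false := by simpa using fun hh => h hh.symm
        simp [h, this]

-- the flag loop is 'any'
theorem foldl_flag {α : Type} (p : α → Bool) (xs : List α) (b : Bool) :
    xs.foldl (fun c i => if p i then true else c) b = (b || xs.any p) := by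
  induction xs generalizing b with
  | nil => simp
  | cons x xs ih =>
      rw [List.foldl_cons, ih]
      by_cases h : p x = true <;> simp [h]

theorem Dui_eq_any (five_list : List (Int × String)) :
    Dui five_list
      = (five_list.map Prod.snd).any
          (fun r => (five_list.map Prod.snd).count r == 2) := by
  simp only [Dui, foldl_flag, Bool.false_or]
  rw [List.any_map]
  have h : ∀ i ∈ five_list,
      (((five_list.foldl duiStep PySem.Dict.empty).getD i.2 0 == 2) : Bool)
        = (((five_list.map Prod.snd).count i.2 == 2) : Bool) := by
    intro i _
    rw [getD_foldl_duiStep]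
    simp only [PySem.Dict.getD_empty, zero_add]
    by_cases h2 : List.count i.2 (five_list.map Prod.snd) = 2
    · simp [h2]
    · have h2' : (List.count i.2 (five_list.map Prod.snd) : Int) ≠ 2 := by exact_mod_cast h2
      simp [h2, h2']
  try simp only [Function.comp]
  rw [any_congr_mem h]
  exact if_bool_id _

-- in a ≤-sorted list headed by r, no copy of r survives past its run
theorem not_mem_dropWhile_of_le (r : String) (rest : List String)
    (hs : rest.Pairwise (fun a b => a ≤ b)) (hle : ∀ x ∈ rest, r ≤ x) :
    r ∉ rest.dropWhile (fun x => x == r) := by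
  induction rest with
  | nil => simp
  | cons y ys ih =>
      by_cases hy : (y == r) = true
      · rw [List.dropWhile_cons, if_pos hy]
        exact ih hs.of_cons (fun x hx => hle x (by simp [hx]))
      · rw [List.dropWhile_cons, if_neg hy]
        intro hmem
        have hyr : y ≠ r := by simpa using hy
        have hry : r < y := lt_of_le_of_ne (hle y (by simp)) (Ne.symm hyr)
        rcases List.mem_cons.mp hmem with h | h
        · exact hyr h.symm
        · exact absurd ((List.pairwise_cons.mp hs).1 r h) (not_le.mpr hry)

-- count of the head of a sorted list = 1 + its run length
theorem count_head_sorted (r : String) (rest : List String)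
    (hs : (r :: rest).Pairwise (fun a b => a ≤ b)) :
    (r :: rest).count r = (rest.takeWhile (fun x => x == r)).length + 1 := by
  have hle := (List.pairwise_cons.mp hs).1
  have hnd : r ∉ rest.dropWhile (fun x => x == r) :=
    not_mem_dropWhile_of_le r rest hs.of_cons hle
  have hsplit : rest.takeWhile (fun x => x == r) ++ rest.dropWhile (fun x => x == r) = rest :=
    List.takeWhile_append_dropWhile
  have htw : (rest.takeWhile (fun x => x == r)).count r
      = (rest.takeWhile (fun x => x == r)).length :=
    List.count_eq_length.mpr (by
      intro b hb
      have h := List.mem_takeWhile_imp hb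
      exact (eq_of_beq h).symm)
  calc (r :: rest).count r = rest.count r + 1 := by simp
    _ = ((rest.takeWhile (fun x => x == r)).count r
          + (rest.dropWhile (fun x => x == r)).count r) + 1 := by
        conv_lhs => rw [← hsplit]
        rw [List.count_append]
    _ = (rest.takeWhile (fun x => x == r)).length + 1 := by
        rw [htw, List.count_eq_zero.mpr hnd]

-- counts of elements past the head's run are unchanged by dropping the run
theorem count_mem_dropWhile (r : String) (rest : List String)
    (hs : (r :: rest).Pairwise (fun a b => a ≤ b))
    (v : String) (hv : v ∈ rest.dropWhile (fun x => x == r)) :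
    (r :: rest).count v = (rest.dropWhile (fun x => x == r)).count v := by
  have hle := (List.pairwise_cons.mp hs).1
  have hnd : r ∉ rest.dropWhile (fun x => x == r) :=
    not_mem_dropWhile_of_le r rest hs.of_cons hle
  have hvr : v ≠ r := fun h => hnd (h ▸ hv)
  have hsplit : rest.takeWhile (fun x => x == r) ++ rest.dropWhile (fun x => x == r) = rest :=
    List.takeWhile_append_dropWhile
  have htw : (rest.takeWhile (fun x => x == r)).count v = 0 :=
    List.count_eq_zero.mpr (by
      intro hb
      have h := List.mem_takeWhile_imp hb
      exact hvr (eq_of_beq h))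
  have hrest : rest.count v = (rest.dropWhile (fun x => x == r)).count v := by
    conv_lhs => rw [← hsplit]
    rw [List.count_append, htw, Nat.zero_add]
  have hne : (r == v) = false := by
    cases hb : r == v
    · rfl
    · exact absurd (eq_of_beq hb).symm hvr
  rw [List.count_cons, hne, if_neg Bool.false_ne_true, Nat.add_zero, hrest]

-- on a ≤-sorted list the run scan finds exactly the ranks occurring exactly twice
theorem duiRuns_eq_any (l : List String) :
    l.Pairwise (fun a b => a ≤ b) → duiRuns l = l.any (fun x => l.count x == 2) := by
  induction l using duiRuns.induct with
  | case1 => intro _; simp [duiRuns]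
  | case2 r rest htrue =>
      intro hs
      rw [duiRuns, if_pos htrue]
      have hlen : (rest.takeWhile (fun x => x == r)).length + 1 = 2 := by
        simpa using htrue
      have hc : (r :: rest).count r = 2 := by rw [count_head_sorted r rest hs, hlen]
      symm
      rw [List.any_eq_true]
      exact ⟨r, by simp, by simp [hc]⟩
  | case3 r rest hfalse ih =>
      intro hs
      have hlen : (rest.takeWhile (fun x => x == r)).length + 1 ≠ 2 := by
        simpa using hfalse
      have hc : (r :: rest).count r ≠ 2 := by
        rw [count_head_sorted r rest hs]; exact hlen
      have hdl : (rest.dropWhile (fun x => x == r)).Pairwise (fun a b => a ≤ b) :=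
        hs.of_cons.sublist (List.dropWhile_sublist _)
      rw [duiRuns, if_neg hfalse, ih hdl]
      have hsplit : rest.takeWhile (fun x => x == r) ++ rest.dropWhile (fun x => x == r) = rest :=
        List.takeWhile_append_dropWhile
      cases hq : (rest.dropWhile (fun x => x == r)).any
          (fun x => (rest.dropWhile (fun x => x == r)).count x == 2) with
      | true =>
          obtain ⟨v, hv, hpv⟩ := List.any_eq_true.mp hq
          symm
          rw [List.any_eq_true]
          refine ⟨v, List.mem_cons_of_mem r ((List.dropWhile_sublist _).subset hv), ?_⟩
          rw [count_mem_dropWhile r rest hs v hv]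
          exact hpv
      | false =>
          symm
          rw [List.any_eq_false]
          intro x hx
          rcases List.mem_cons.mp hx with h | h
          · subst h; simpa using hc
          · rw [← hsplit] at h
            rcases List.mem_append.mp h with h | h
            · have hxr : x = r := by simpa using List.mem_takeWhile_imp h
              subst hxr; simpa using hc
            · rw [count_mem_dropWhile r rest hs x h]
              exact List.any_eq_false.mp hq x h

-- ===== VERDICT (by name: the statement is the Claim_ definition above) =====
theorem Dui_spec : Claim_equal_Dui := by
  intro five_list _
  unfold Spec_Dui Dui_alt
  rw [Dui_eq_any]
  have hpair : (PySem.List.sorted (five_list.map Prod.snd) (fun x => x) false).Pairwise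
      (fun a b => a ≤ b) := PySem.List.sorted_pairwise _ _
  rw [duiRuns_eq_any _ hpair]
  have hperm := PySem.List.sorted_perm (five_list.map Prod.snd) (fun x : String => x) false
  have hcnt : ∀ x, (PySem.List.sorted (five_list.map Prod.snd) (fun x => x) false).count x
      = (five_list.map Prod.snd).count x := fun x => hperm.count_eq x
  have h2 : (PySem.List.sorted (five_list.map Prod.snd) (fun x => x) false).any
        (fun x => (PySem.List.sorted (five_list.map Prod.snd) (fun x => x) false).count x == 2)
      = (PySem.List.sorted (five_list.map Prod.snd) (fun x => x) false).any
        (fun x => (five_list.map Prod.snd).count x == 2) :=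
    any_congr_mem (fun x _ => by rw [hcnt x])
  rw [h2]
  exact (hperm.any_eq).symm
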